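-- pv_equiv track=rewrite | github.com/sahahn/BPt | BPt/pipeline/constructors.py | check_for_duplicate_names
-- ===== SOURCE A (Python) =====
-- def check_for_duplicate_names(objs_and_params):
--     '''Checks for duplicate names within an objs_and_params type obj'''
--
--     names = [c[0] for c in objs_and_params]
--
--     # If any repeats
--     if len(names) != len(set(names)):
--         new_objs_and_params = []
--
--         for obj in objs_and_params:
--             name = obj[0]
--
--             if name in names:
--
--                 cnt = 0
--                 used = [c[0] for c in new_objs_and_params]
--                 while name + str(cnt) in used:
--                     cnt += 1
--
--                 # Need to change name within params also
--                 base_obj = obj[1][0]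
--                 base_obj_params = obj[1][1]
--
--                 new_obj_params = {}
--                 for param_name in base_obj_params:
--
--                     p_split = param_name.split('__')
--                     new_param_name = p_split[0] + str(cnt)
--                     new_param_name += '__' + '__'.join(p_split[1:])
--
--                     new_obj_params[new_param_name] =\
--                         base_obj_params[param_name]
--
--                 new_objs_and_params.append((name + str(cnt),
--                                            (base_obj, new_obj_params)))
--
--             else:
--                 new_objs_and_params.append(obj)
--
--         return new_objs_and_params
--     return objs_and_params
-- ===== SOURCE B (Python) =====
-- def _renamed(param_name, cnt):
--     head, *rest = param_name.split('__')
--     return head + str(cnt) + '__' + '__'.join(rest)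
--
--
-- def check_for_duplicate_names(objs_and_params):
--     '''Checks for duplicate names within an objs_and_params type obj'''
--
--     names = [c[0] for c in objs_and_params]
--     if len(set(names)) == len(names):
--         return objs_and_params
--
--     used = set()
--     counter = {}
--     out = []
--     for name, (base_obj, base_params) in objs_and_params:
--         # resume the search for a free suffix where it last stopped for this name
--         cnt = counter.get(name, 0)
--         while name + str(cnt) in used:
--             cnt += 1
--         counter[name] = cnt + 1
--         used.add(name + str(cnt))
--
--         new_params = {_renamed(p, cnt): v for p, v in base_params.items()}
--         out.append((name + str(cnt), (base_obj, new_params)))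
--     return out
-- ===== Notes on version B (the rewrite author's own statement) =====
-- stated objective: alternative
-- what changed: A rebuilds the list of already-assigned names and rescans it from suffix 0 for every renamed object; B instead maintains an incrementally grown used-name set plus a per-name resume counter, probing forward from where the search for that name last stopped.
import Mathlib
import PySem

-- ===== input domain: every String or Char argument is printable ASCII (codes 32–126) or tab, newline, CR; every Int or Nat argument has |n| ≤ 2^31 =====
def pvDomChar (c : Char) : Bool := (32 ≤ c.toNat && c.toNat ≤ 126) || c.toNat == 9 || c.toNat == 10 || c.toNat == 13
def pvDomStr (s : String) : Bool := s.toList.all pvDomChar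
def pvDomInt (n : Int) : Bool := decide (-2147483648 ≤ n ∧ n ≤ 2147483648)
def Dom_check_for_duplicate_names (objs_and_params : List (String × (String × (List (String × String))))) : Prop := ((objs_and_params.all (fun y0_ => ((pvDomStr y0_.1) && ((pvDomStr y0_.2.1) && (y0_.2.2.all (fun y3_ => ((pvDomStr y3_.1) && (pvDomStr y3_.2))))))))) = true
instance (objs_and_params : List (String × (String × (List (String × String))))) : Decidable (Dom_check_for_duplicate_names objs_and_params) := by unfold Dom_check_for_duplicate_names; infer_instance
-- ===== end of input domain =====

-- B replaces A's per-object rescan of the output built so far (rebuild `used`, count up from 0)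
-- by an incrementally maintained used-name set plus a per-name resume counter; return value only.

-- ===== PORT A =====
-- the 'while name + str(cnt) in used: cnt += 1' loop, fueled; it terminates within
-- used.length + 1 iterations (at most used.length suffixed names can be members)
def pvCntLoopA (used : List String) (name : String) (cnt fuel : Nat) : Nat :=
  match fuel with
  | 0 => cnt
  | f + 1 =>
    if used.contains (name ++ PySem.Int.toStr (cnt : Int)) then
      pvCntLoopA used name (cnt + 1) f
    else cnt

-- the body of A's 'for obj in objs_and_params' loop (appends to new_objs_and_params)
def pvStepA (names : List String) (acc : List (String × (String × (List (String × String)))))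
    (obj : String × (String × (List (String × String)))) :
    List (String × (String × (List (String × String)))) :=
  let name := obj.1
  if names.contains name then
    let used := acc.map (fun c => c.1)
    let cnt := pvCntLoopA used name 0 (used.length + 1)
    let base_obj := obj.2.1
    let base_obj_params := obj.2.2
    -- 'for param_name in base_obj_params': iterate the dict's items; the looked-up value
    -- base_obj_params[param_name] is the item's value (dict keys are unique)
    let new_obj_params := base_obj_params.foldl
      (fun (d : PySem.Dict String String) pv =>
        let psplit := (PySem.Str.split? pv.1 "__").getD []   -- sep "__" ≠ "": split? is never none
        let new_param_name := psplit.headD "" ++ PySem.Int.toStr (cnt : Int) ++ "__"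
          ++ PySem.Str.join "__" psplit.tail
        d.insert new_param_name pv.2) PySem.Dict.empty
    acc ++ [(name ++ PySem.Int.toStr (cnt : Int), (base_obj, new_obj_params.items))]
  else acc ++ [obj]

def check_for_duplicate_names (objs_and_params : List (String × (String × (List (String × String))))) : List (String × (String × (List (String × String)))) :=
  let names := objs_and_params.map (fun c => c.1)
  if names.length ≠ (PySem.Set.ofList names).length then
    objs_and_params.foldl (pvStepA names) []
  else objs_and_params

-- ===== PORT B =====
def pvRenamedB (cnt : Nat) (p : String) : String :=
  let psplit := (PySem.Str.split? p "__").getD []   -- sep "__" ≠ "": split? is never none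
  psplit.headD "" ++ PySem.Int.toStr (cnt : Int) ++ "__" ++ PySem.Str.join "__" psplit.tail

-- B's 'while name + str(cnt) in used: cnt += 1' over the incremental set, fueled likewise
def pvCntLoopB (used : PySem.Set String) (name : String) (cnt fuel : Nat) : Nat :=
  match fuel with
  | 0 => cnt
  | f + 1 =>
    if PySem.Set.contains used (name ++ PySem.Int.toStr (cnt : Int)) then
      pvCntLoopB used name (cnt + 1) f
    else cnt

-- the body of B's loop: state = (out, used, counter)
def pvStepB (st : List (String × (String × (List (String × String)))) × PySem.Set String × PySem.Dict String Nat)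
    (obj : String × (String × (List (String × String)))) :
    List (String × (String × (List (String × String)))) × PySem.Set String × PySem.Dict String Nat :=
  let name := obj.1
  let cnt := pvCntLoopB st.2.1 name (st.2.2.getD name 0) (st.2.1.length + 1)
  let newName := name ++ PySem.Int.toStr (cnt : Int)
  let new_params := obj.2.2.foldl
    (fun (d : PySem.Dict String String) pv => d.insert (pvRenamedB cnt pv.1) pv.2) PySem.Dict.empty
  (st.1 ++ [(newName, (obj.2.1, new_params.items))],
   PySem.Set.add st.2.1 newName,
   st.2.2.insert name (cnt + 1))

def check_for_duplicate_names_alt (objs_and_params : List (String × (String × (List (String × String))))) : List (String × (String × (List (String × String)))) :=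
  let names := objs_and_params.map (fun c => c.1)
  if (PySem.Set.ofList names).length = names.length then objs_and_params
  else (objs_and_params.foldl pvStepB ([], PySem.Set.empty, PySem.Dict.empty)).1

-- ===== PRECONDITION & SPEC =====
def Spec_check_for_duplicate_names (objs_and_params : List (String × (String × (List (String × String))))) (out : List (String × (String × (List (String × String))))) : Prop := out = check_for_duplicate_names_alt objs_and_params
instance (objs_and_params : List (String × (String × (List (String × String))))) (out : List (String × (String × (List (String × String))))) : Decidable (Spec_check_for_duplicate_names objs_and_params out) := by unfold Spec_check_for_duplicate_names; infer_instance

-- ===== CLAIM (what is proved, stated in full; the proofs are below) =====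
def Claim_equal_check_for_duplicate_names : Prop := ∀ (objs_and_params : List (String × (String × (List (String × String))))), Dom_check_for_duplicate_names objs_and_params → Spec_check_for_duplicate_names objs_and_params (check_for_duplicate_names objs_and_params)

-- ===== LEMMAS AND PROOFS =====

lemma pv_digitChar_inj {a b : Nat} (ha : a < 10) (hb : b < 10)
    (h : Nat.digitChar a = Nat.digitChar b) : a = b := by
  interval_cases a <;> interval_cases b <;> simp_all [Nat.digitChar]

lemma pv_toDigits_inj : ∀ (m n : Nat), Nat.toDigits 10 m = Nat.toDigits 10 n → m = n := by
  intro m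
  induction m using Nat.strong_induction_on with
  | _ m ih =>
    intro n h
    rw [Nat.toDigits_eq_if (n := m) (by norm_num), Nat.toDigits_eq_if (n := n) (by norm_num)] at h
    by_cases h1 : m < 10 <;> by_cases h2 : n < 10
    · rw [if_pos h1, if_pos h2] at h
      exact pv_digitChar_inj h1 h2 (List.singleton_inj.mp h)
    · rw [if_pos h1, if_neg h2] at h
      have hlen := congrArg List.length h
      simp only [List.length_append, List.length_cons, List.length_nil] at hlen
      have hpos := Nat.length_toDigits_pos (b := 10) (n := n / 10)
      omega
    · rw [if_neg h1, if_pos h2] at h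
      have hlen := congrArg List.length h
      simp only [List.length_append, List.length_cons, List.length_nil] at hlen
      have hpos := Nat.length_toDigits_pos (b := 10) (n := m / 10)
      omega
    · rw [if_neg h1, if_neg h2] at h
      obtain ⟨hq, hr⟩ := List.append_singleton_inj.mp h
      have hdiv : m / 10 = n / 10 := ih (m / 10) (Nat.div_lt_self (by omega) (by norm_num)) _ hq
      have hmod : m % 10 = n % 10 :=
        pv_digitChar_inj (Nat.mod_lt _ (by norm_num)) (Nat.mod_lt _ (by norm_num)) hr
      omega

lemma pv_suffix_inj (name : String) : Function.Injective
    (fun k : Nat => name ++ PySem.Int.toStr (k : Int)) := by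
  intro j k h
  have h2 : PySem.Int.toStr (j : Int) = PySem.Int.toStr (k : Int) :=
    (String.append_right_inj name).mp h
  simp only [PySem.Int.toStr, PySem.Int.toChars] at h2
  have hj : ¬ ((j : Int) < 0) := by omega
  have hk : ¬ ((k : Int) < 0) := by omega
  rw [if_neg hj, if_neg hk] at h2
  have h3 := String.ofList_inj.mp h2
  simpa using pv_toDigits_inj _ _ (by simpa using h3)

lemma pv_exists_free (used : List String) (name : String) :
    ∃ k : Nat, (name ++ PySem.Int.toStr (k : Int)) ∉ used ∧ k ≤ used.length := by
  by_contra hc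
  have hall : ∀ k ≤ used.length, (name ++ PySem.Int.toStr (k : Int)) ∈ used := by
    intro k hk
    by_contra hn
    exact hc ⟨k, hn, hk⟩
  set l := (List.range (used.length + 1)).map (fun k : Nat => name ++ PySem.Int.toStr (k : Int)) with hl
  have hnd : l.Nodup := (List.nodup_range).map (pv_suffix_inj name)
  have hsub : l ⊆ used := by
    intro x hx
    simp only [hl, List.mem_map, List.mem_range] at hx
    obtain ⟨k, hk, rfl⟩ := hx
    exact hall k (by omega)
  have hlen : l.length ≤ used.length := by
    calc l.length = l.toFinset.card := (List.toFinset_card_of_nodup hnd).symm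
      _ ≤ used.toFinset.card := Finset.card_le_card
          (by intro x hx; rw [List.mem_toFinset] at *; exact hsub hx)
      _ ≤ used.length := used.toFinset_card_le
  simp [hl] at hlen

lemma pv_loopA_spec (used : List String) (name : String)
    (hex : ∃ k : Nat, (name ++ PySem.Int.toStr (k : Int)) ∉ used) :
    ∀ (fuel s : Nat),
      (∀ k : Nat, k < s → (name ++ PySem.Int.toStr (k : Int)) ∈ used) →
      Nat.find hex < s + fuel →
      pvCntLoopA used name s fuel = Nat.find hex := by
  intro fuel
  induction fuel with
  | zero =>
    intro s hs hfuel
    have hge : s ≤ Nat.find hex := by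
      by_contra hlt
      exact (Nat.find_spec hex) (hs _ (by omega))
    omega
  | succ f ihf =>
    intro s hs hfuel
    by_cases hmem : (name ++ PySem.Int.toStr (s : Int)) ∈ used
    · have hne : Nat.find hex ≠ s := fun he => (Nat.find_spec hex) (he ▸ hmem)
      have hge : s ≤ Nat.find hex := by
        by_contra hlt
        exact (Nat.find_spec hex) (hs _ (by omega))
      rw [pvCntLoopA, if_pos (by simpa using hmem)]
      have hstep : ∀ k : Nat, k < s + 1 → name ++ PySem.Int.toStr (k : Int) ∈ used := by
        intro k hk
        rcases Nat.lt_succ_iff_lt_or_eq.mp hk with hlt | rfl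
        · exact hs k hlt
        · exact hmem
      exact ihf (s + 1) hstep (by omega)
    · have hle : Nat.find hex ≤ s := Nat.find_le hmem
      have hge : s ≤ Nat.find hex := by
        by_contra hlt
        exact (Nat.find_spec hex) (hs _ (by omega))
      rw [pvCntLoopA, if_neg (by simpa using hmem)]
      omega

lemma pv_loopB_eq_loopA (used : PySem.Set String) (name : String) :
    ∀ (fuel s : Nat), pvCntLoopB used name s fuel = pvCntLoopA used name s fuel := by
  intro fuel
  induction fuel with
  | zero => intro s; rfl
  | succ f ihf =>
    intro s
    rw [pvCntLoopA, pvCntLoopB, PySem.Set.contains_eq_listContains]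
    split_ifs with h
    · exact ihf (s + 1)
    · rfl

lemma pv_loop_eq (names : List String) :
    ∀ (objs acc : List (String × (String × (List (String × String)))))
      (used : PySem.Set String) (counter : PySem.Dict String Nat),
      used = acc.map (fun c => c.1) →
      (∀ (nm : String) (k : Nat), k < counter.getD nm 0 →
        (nm ++ PySem.Int.toStr (k : Int)) ∈ used) →
      (∀ obj ∈ objs, names.contains obj.1 = true) →
      objs.foldl (pvStepA names) acc = (objs.foldl pvStepB (acc, used, counter)).1 := by
  intro objs
  induction objs with
  | nil => intro acc used counter _ _ _; rfl
  | cons obj rest ih =>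
    intro acc used counter hused hcnt hmem
    simp only [List.foldl_cons]
    have hc : names.contains obj.1 = true := hmem obj (by simp)
    obtain ⟨k0, hk0, hk0le⟩ := pv_exists_free used obj.1
    have hex : ∃ k : Nat, (obj.1 ++ PySem.Int.toStr (k : Int)) ∉ used := ⟨k0, hk0⟩
    have hfind_le : Nat.find hex ≤ used.length := le_trans (Nat.find_le hk0) hk0le
    -- A's counter value
    have hA : pvCntLoopA (acc.map (fun c => c.1)) obj.1 0 ((acc.map (fun c => c.1)).length + 1)
        = Nat.find hex := by
      rw [← hused]
      exact pv_loopA_spec used obj.1 hex _ 0 (by omega) (by omega)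
    -- B's counter value
    have hstart : ∀ k : Nat, k < counter.getD obj.1 0 → (obj.1 ++ PySem.Int.toStr (k : Int)) ∈ used :=
      fun k hk => hcnt obj.1 k hk
    have hge : counter.getD obj.1 0 ≤ Nat.find hex := by
      by_contra hlt
      exact (Nat.find_spec hex) (hstart _ (by omega))
    have hB : pvCntLoopB used obj.1 (counter.getD obj.1 0) (used.length + 1) = Nat.find hex := by
      rw [pv_loopB_eq_loopA]
      exact pv_loopA_spec used obj.1 hex _ _ hstart (by omega)
    set L := Nat.find hex with hL
    have hfresh : (obj.1 ++ PySem.Int.toStr (L : Int)) ∉ used := Nat.find_spec hex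
    -- the two step results
    have hstepA : pvStepA names acc obj = (pvStepB (acc, used, counter) obj).1 := by
      simp only [pvStepA, pvStepB, pvRenamedB, hc, if_true, hA, hB]
    have hstate1 : (pvStepB (acc, used, counter) obj).2.1
        = (pvStepA names acc obj).map (fun c => c.1) := by
      simp only [pvStepA, pvStepB, hc, if_true, hA, hB]
      rw [PySem.Set.add_of_not_mem hfresh, hused]
      simp
    have hstate2 : ∀ (nm : String) (k : Nat),
        k < ((pvStepB (acc, used, counter) obj).2.2).getD nm 0 →
        (nm ++ PySem.Int.toStr (k : Int)) ∈ (pvStepB (acc, used, counter) obj).2.1 := by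
      intro nm k hk
      simp only [pvStepB, hB] at hk ⊢
      rw [PySem.Set.add_of_not_mem hfresh]
      rw [PySem.Dict.getD_insert] at hk
      by_cases hnm : nm = obj.1
      · subst hnm
        rw [if_pos rfl] at hk
        rcases Nat.lt_succ_iff_lt_or_eq.mp hk with h | rfl
        · have hPk : (obj.1 ++ PySem.Int.toStr (k : Int)) ∈ used := by
            by_contra hnk
            have h2 : L ≤ k := Nat.find_le hnk
            omega
          exact List.mem_append_left _ hPk
        · exact List.mem_append_right _ (by simp)
      · rw [if_neg hnm] at hk
        exact List.mem_append_left _ (hcnt nm k hk)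
    rw [hstepA]
    exact ih (pvStepB (acc, used, counter) obj).1 (pvStepB (acc, used, counter) obj).2.1
      (pvStepB (acc, used, counter) obj).2.2
      (by rw [hstate1, hstepA]) hstate2
      (fun o ho => hmem o (List.mem_cons_of_mem _ ho))

lemma pv_final (objs : List (String × (String × (List (String × String))))) :
    check_for_duplicate_names objs = check_for_duplicate_names_alt objs := by
  unfold check_for_duplicate_names check_for_duplicate_names_alt
  by_cases h : (objs.map (fun c => c.1)).length = (PySem.Set.ofList (objs.map (fun c => c.1))).length
  · simp [h]
  · rw [if_pos (by omega), if_neg (by omega)]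
    rw [PySem.Set.empty_eq]
    apply pv_loop_eq
    · rfl
    · intro nm k hk
      simp [PySem.Dict.getD_empty] at hk
    · intro obj hobj
      simp only [List.contains_iff_mem, List.mem_map]
      exact ⟨obj, hobj, rfl⟩

-- ===== VERDICT (by name: the statement is the Claim_ definition above) =====
theorem check_for_duplicate_names_spec : Claim_equal_check_for_duplicate_names := by
  intro objs _
  unfold Spec_check_for_duplicate_names
  exact pv_final objs
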